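-- pv_equiv track=rewrite | github.com/TechRoot/Glass | 20210412/lib/fsm_utils.py | bfs_reachability
-- ===== SOURCE A (Python) =====
-- from collections import deque
-- from typing import Dict, Iterable, List, Tuple, Callable
--
-- def bfs_reachability(adj: Dict[str, List[str]], start: str, target: str) -> Tuple[bool, int]:
--     """Realiza una búsqueda en anchura sobre un grafo dirigido para determinar
--     si `target` es alcanzable desde `start`.
--
--     Args:
--         adj: diccionario que mapea cada estado a la lista de estados sucesores.
--         start: estado inicial.
--         target: estado objetivo.
--
--     Returns:
--         Una tupla (alcanzable, nodos_visitados). La bandera es verdadera si se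
--         alcanza el objetivo. `nodos_visitados` indica cuántos estados han
--         sido extraídos de la cola (aproximación de la complejidad temporal).
--     """
--     visited = set()
--     queue = deque([start])
--     visited.add(start)
--     nodes_visited = 0
--     while queue:
--         current = queue.popleft()
--         nodes_visited += 1
--         if current == target:
--             return True, nodes_visited
--         for succ in adj.get(current, []):
--             if succ not in visited:
--                 visited.add(succ)
--                 queue.append(succ)
--     return False, nodes_visited
-- ===== SOURCE B (Python) =====
-- def bfs_reachability(adj, start, target):
--     """Level-synchronous BFS: process whole frontiers instead of a deque."""
--     visited = {start}
--     frontier = [start]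
--     nodes_visited = 0
--     while frontier:
--         nxt = []
--         for node in frontier:
--             nodes_visited += 1
--             if node == target:
--                 return True, nodes_visited
--             for succ in adj.get(node, []):
--                 if succ not in visited:
--                     visited.add(succ)
--                     nxt.append(succ)
--         frontier = nxt
--     return False, nodes_visited
-- ===== Notes on version B (the rewrite author's own statement) =====
-- stated objective: alternative
-- what changed: Replaces the single deque loop by level-synchronous BFS: a plain list frontier is processed level by level, building the next level's list, with no queue data structure; visitation order and the extracted-node count are preserved.
import Mathlib
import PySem

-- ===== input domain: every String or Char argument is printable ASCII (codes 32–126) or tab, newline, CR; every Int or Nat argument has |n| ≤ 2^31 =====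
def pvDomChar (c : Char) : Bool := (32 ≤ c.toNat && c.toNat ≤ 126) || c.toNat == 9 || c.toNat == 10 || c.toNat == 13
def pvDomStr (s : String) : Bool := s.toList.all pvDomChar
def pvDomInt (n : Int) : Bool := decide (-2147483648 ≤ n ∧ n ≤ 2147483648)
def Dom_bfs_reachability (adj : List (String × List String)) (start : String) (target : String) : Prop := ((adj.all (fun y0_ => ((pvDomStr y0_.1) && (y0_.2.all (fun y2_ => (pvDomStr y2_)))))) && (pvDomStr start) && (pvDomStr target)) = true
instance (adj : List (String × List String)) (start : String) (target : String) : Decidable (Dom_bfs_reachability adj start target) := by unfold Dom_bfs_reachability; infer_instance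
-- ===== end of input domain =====

-- B is level-synchronous BFS over frontier lists instead of A's single deque; same visitation order and count (objective: alternative).
-- Both ports carry a fuel argument solely to make the loops total; the fuel (1 + total successor-list length)
-- strictly exceeds the number of dequeues Python ever performs, so the guard is never hit, and the
-- equivalence theorem holds for every fuel value anyway.

-- ===== PORT A =====
-- the shared inner successor loop: for succ in adj.get(current, []): if succ not in visited: add+append
-- (this for-loop is textually identical in A and B, so both ports use this one helper)
def pvPush (v : PySem.Set String) (todo : List String) : List String → List String × PySem.Set String
  | [] => (todo, v)
  | s :: ss =>
    if PySem.Set.contains v s then pvPush v todo ss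
    else pvPush (PySem.Set.add v s) (todo ++ [s]) ss

-- A's while loop: pop from the front of the one queue, count, test, push successors at the back
def pvLoopA (adj : List (String × List String)) (target : String) : Nat → List String → PySem.Set String → Int → Bool × Int
  | _, [], _, c => (false, c)
  | 0, _ :: _, _, c => (false, c)
  | fuel + 1, cur :: rest, v, c =>
    if cur == target then (true, c + 1)
    else
      let p := pvPush v rest (PySem.Dict.getD (PySem.Dict.mk adj) cur [])
      pvLoopA adj target fuel p.1 p.2 (c + 1)

def bfs_reachability (adj : List (String × List String)) (start : String) (target : String) : Bool × Int :=
  pvLoopA adj target (1 + (adj.map (fun p => p.2.length)).sum) [start]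
    (PySem.Set.add PySem.Set.empty start) 0

-- ===== PORT B =====
-- B's inner for-loop over the current frontier, accumulating the next level in nxt;
-- .inl = early return (or fuel guard), .inr = level finished with (remaining fuel, nxt, visited, count)
def pvInner (adj : List (String × List String)) (target : String) : Nat → List String → PySem.Set String → List String → Int → Sum (Bool × Int) (Nat × List String × PySem.Set String × Int)
  | fuel, [], v, nxt, c => .inr (fuel, nxt, v, c)
  | 0, _ :: _, _, _, c => .inl (false, c)
  | fuel + 1, node :: rest, v, nxt, c =>
    if node == target then .inl (true, c + 1)
    else
      let p := pvPush v nxt (PySem.Dict.getD (PySem.Dict.mk adj) node [])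
      pvInner adj target fuel rest p.2 p.1 (c + 1)

-- termination helper for pvOuter: a finished level consumed exactly its length in fuel
theorem pvInner_inr_fuel (adj : List (String × List String)) (target : String) :
    ∀ (fr : List String) (fuel : Nat) (v : PySem.Set String) (nxt : List String) (c : Int)
      (f' : Nat) (nxt' : List String) (v' : PySem.Set String) (c' : Int),
      pvInner adj target fuel fr v nxt c = .inr (f', nxt', v', c') → f' + fr.length = fuel := by
  intro fr
  induction fr with
  | nil => intro fuel v nxt c f' nxt' v' c' h; simp [pvInner] at h; simp [h.1]
  | cons node rest ih =>
    intro fuel v nxt c f' nxt' v' c' h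
    match fuel with
    | 0 => simp [pvInner] at h
    | fuel + 1 =>
      simp only [pvInner] at h
      split at h
      · exact absurd h (by simp)
      · have := ih fuel _ _ _ _ _ _ _ h
        simp only [List.length_cons]; omega

-- B's outer while loop over frontiers
def pvOuter (adj : List (String × List String)) (target : String) : Nat → List String → PySem.Set String → Int → Bool × Int
  | _, [], _, c => (false, c)
  | fuel, node :: rest, v, c =>
    match h : pvInner adj target fuel (node :: rest) v [] c with
    | .inl r => r
    | .inr (f', nxt, v', c') => pvOuter adj target f' nxt v' c'
  termination_by fuel _ => fuel
  decreasing_by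
    have := pvInner_inr_fuel adj target (node :: rest) fuel v [] c f' nxt v' c' h
    simp only [List.length_cons] at this; omega

def bfs_reachability_alt (adj : List (String × List String)) (start : String) (target : String) : Bool × Int :=
  pvOuter adj target (1 + (adj.map (fun p => p.2.length)).sum) [start]
    (PySem.Set.add PySem.Set.empty start) 0

-- ===== PRECONDITION & SPEC =====
def Spec_bfs_reachability (adj : List (String × List String)) (start : String) (target : String) (out : Bool × Int) : Prop := out = bfs_reachability_alt adj start target
instance (adj : List (String × List String)) (start : String) (target : String) (out : Bool × Int) : Decidable (Spec_bfs_reachability adj start target out) := by unfold Spec_bfs_reachability; infer_instance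

-- ===== CLAIM (what is proved, stated in full; the proofs are below) =====
def Claim_equal_bfs_reachability : Prop := ∀ (adj : List (String × List String)) (start : String) (target : String), Dom_bfs_reachability adj start target → Spec_bfs_reachability adj start target (bfs_reachability adj start target)

-- ===== LEMMAS AND PROOFS =====

-- pushing successors onto q1 ++ q2 only ever appends, so the prefix q1 passes through untouched
theorem pvPush_shift (succs : List String) : ∀ (v : PySem.Set String) (q1 q2 : List String),
    pvPush v (q1 ++ q2) succs = (q1 ++ (pvPush v q2 succs).1, (pvPush v q2 succs).2) := by
  induction succs with
  | nil => intro v q1 q2; simp [pvPush]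
  | cons s ss ih =>
    intro v q1 q2
    simp only [pvPush]
    split
    · exact ih v q1 q2
    · rw [List.append_assoc]; exact ih _ q1 (q2 ++ [s])

-- A's queue is always (current frontier) ++ (next level being built); one level of A = one pvInner run
theorem pvLoopA_inner (adj : List (String × List String)) (target : String) :
    ∀ (fr : List String) (fuel : Nat) (nxt : List String) (v : PySem.Set String) (c : Int),
      pvLoopA adj target fuel (fr ++ nxt) v c =
        match pvInner adj target fuel fr v nxt c with
        | .inl r => r
        | .inr (f', nxt', v', c') => pvLoopA adj target f' nxt' v' c' := by
  intro fr
  induction fr with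
  | nil => intro fuel nxt v c; simp [pvInner]
  | cons node rest ih =>
    intro fuel nxt v c
    match fuel with
    | 0 => simp [pvLoopA, pvInner]
    | fuel + 1 =>
      simp only [List.cons_append, pvLoopA, pvInner]
      split
      · rfl
      · rw [pvPush_shift]
        exact ih fuel _ _ _

-- the two loops agree for EVERY fuel value
theorem pvLoopA_eq_pvOuter (adj : List (String × List String)) (target : String) :
    ∀ (fuel : Nat) (fr : List String) (v : PySem.Set String) (c : Int),
      pvLoopA adj target fuel fr v c = pvOuter adj target fuel fr v c := by
  intro fuel
  induction fuel using Nat.strong_induction_on with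
  | _ fuel ih =>
    intro fr v c
    match fr with
    | [] => cases fuel <;> simp [pvLoopA, pvOuter]
    | node :: rest =>
      rw [pvOuter]
      have h0 : pvLoopA adj target fuel (node :: rest) v c
          = pvLoopA adj target fuel ((node :: rest) ++ []) v c := by rw [List.append_nil]
      rw [h0, pvLoopA_inner]
      cases heq : pvInner adj target fuel (node :: rest) v [] c with
      | inl r => rfl
      | inr t =>
        obtain ⟨f', nxt', v', c'⟩ := t
        have hlt := pvInner_inr_fuel adj target (node :: rest) fuel v [] c f' nxt' v' c' heq
        simp only [List.length_cons] at hlt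
        exact ih f' (by omega) nxt' v' c'

-- ===== VERDICT (by name: the statement is the Claim_ definition above) =====
theorem bfs_reachability_spec : Claim_equal_bfs_reachability := by
  intro adj start target _
  unfold Spec_bfs_reachability bfs_reachability bfs_reachability_alt
  exact pvLoopA_eq_pvOuter adj target _ _ _ _
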